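-- pv_equiv track=rewrite | github.com/kobayashi9/NA-GTA-MAC | NA_GTA_MAC/based_on_katz_lindell_na_gta_mac_specific.py | remove_id
-- ===== SOURCE A (Python) =====
-- def remove_id(vfy_im_tuples_list, Tu_list, vfy_Tu_list, gt_label_list):
-- 	Js_list = dict(vfy_im_tuples_list)
-- 	gtt_num = len(Tu_list)
-- 	sample_num = len(vfy_im_tuples_list)
-- 	for i in range(gtt_num):
-- 		if(Tu_list[i] == vfy_Tu_list[i]): #タグが一致しているとき
-- 			for j in range(len(gt_label_list[i])):
-- 				if(gt_label_list[i][j] in Js_list):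
-- 					Js_list.pop(gt_label_list[i][j])
-- 		else:
-- 			continue
-- 	return  Js_list
-- ===== SOURCE B (Python) =====
-- def remove_id(vfy_im_tuples_list, Tu_list, vfy_Tu_list, gt_label_list):
-- 	matched = {lab
-- 		for t, vt, labs in zip(Tu_list, vfy_Tu_list, gt_label_list) if t == vt
-- 		for lab in labs}
-- 	result = {}
-- 	for k, v in vfy_im_tuples_list:
-- 		if k not in matched:
-- 			result[k] = v
-- 	return result
-- ===== Notes on version B (the rewrite author's own statement) =====
-- stated objective: simpler
-- what changed: A builds the full dict first and then pops matched labels out of it in place with indexed nested loops; B instead zips the three lists, collects all matched labels into one set with a comprehension, and builds the result dict in a single filtering pass over the input pairs, with no index arithmetic and no in-place deletion.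
import Mathlib
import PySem

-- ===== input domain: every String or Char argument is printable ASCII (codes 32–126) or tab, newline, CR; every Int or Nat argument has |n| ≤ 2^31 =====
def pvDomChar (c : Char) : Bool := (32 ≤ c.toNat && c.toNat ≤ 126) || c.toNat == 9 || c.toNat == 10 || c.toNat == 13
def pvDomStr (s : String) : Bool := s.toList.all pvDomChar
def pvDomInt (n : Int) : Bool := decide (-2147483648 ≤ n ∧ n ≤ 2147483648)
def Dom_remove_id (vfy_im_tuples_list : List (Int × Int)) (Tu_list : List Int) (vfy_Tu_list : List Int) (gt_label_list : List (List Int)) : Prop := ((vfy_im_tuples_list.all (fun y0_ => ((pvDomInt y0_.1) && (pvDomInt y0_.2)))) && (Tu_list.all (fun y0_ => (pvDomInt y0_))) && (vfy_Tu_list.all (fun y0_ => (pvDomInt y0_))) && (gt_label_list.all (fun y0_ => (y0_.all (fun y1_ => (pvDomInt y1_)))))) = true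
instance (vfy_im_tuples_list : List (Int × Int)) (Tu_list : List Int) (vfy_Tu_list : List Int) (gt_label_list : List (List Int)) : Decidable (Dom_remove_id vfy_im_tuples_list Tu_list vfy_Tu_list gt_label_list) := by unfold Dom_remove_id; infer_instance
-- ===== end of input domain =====

-- B zips the three lists, collects the matched labels into one set, and builds the result
-- in a single filtering pass instead of A's indexed build-then-pop-in-place; objective: simpler.

-- ===== PORT A =====
def remove_id (vfy_im_tuples_list : List (Int × Int)) (Tu_list : List Int) (vfy_Tu_list : List Int) (gt_label_list : List (List Int)) : List (Int × Int) :=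
  let Js0 : PySem.Dict Int Int := PySem.Dict.ofList vfy_im_tuples_list
  let Js :=
    (PySem.List.pyRange 0 (Tu_list.length : Int) 1).foldl
      (fun d i =>
        if PySem.List.pyGetD Tu_list i 0 = PySem.List.pyGetD vfy_Tu_list i 0 then
          let g := PySem.List.pyGetD gt_label_list i []
          (PySem.List.pyRange 0 (g.length : Int) 1).foldl
            (fun d j =>
              if d.contains (PySem.List.pyGetD g j 0) then d.erase (PySem.List.pyGetD g j 0) else d)
            d
        else d)
      Js0
  Js.items

-- ===== PORT B =====
-- the set comprehension over zip(Tu_list, vfy_Tu_list, gt_label_list): matched labels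
def pvCollectLabels : List (Int × Int × List Int) → List Int
  | [] => []
  | (t, vt, labs) :: rest => (if t = vt then labs else []) ++ pvCollectLabels rest

-- the result-building loop: result[k] = v for each pair whose key is not matched
def pvBuildOut (matched : PySem.Set Int) : List (Int × Int) → PySem.Dict Int Int → PySem.Dict Int Int
  | [], d => d
  | (k, w) :: rest, d =>
      pvBuildOut matched rest (if matched.contains k then d else d.insert k w)

def remove_id_alt (vfy_im_tuples_list : List (Int × Int)) (Tu_list : List Int) (vfy_Tu_list : List Int) (gt_label_list : List (List Int)) : List (Int × Int) :=
  let matched : PySem.Set Int :=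
    PySem.Set.ofList (pvCollectLabels (Tu_list.zip (vfy_Tu_list.zip gt_label_list)))
  (pvBuildOut matched vfy_im_tuples_list PySem.Dict.empty).items

-- ===== PRECONDITION & SPEC =====
-- Pre_ excludes exactly the inputs on which Python A raises IndexError: an index i < len(Tu_list)
-- with vfy_Tu_list[i] missing, or with matching tags but gt_label_list[i] missing.
def Pre_remove_id (vfy_im_tuples_list : List (Int × Int)) (Tu_list : List Int) (vfy_Tu_list : List Int) (gt_label_list : List (List Int)) : Prop :=
  ∀ i : Nat, i < Tu_list.length →
    i < vfy_Tu_list.length ∧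
      (Tu_list.getD i 0 = vfy_Tu_list.getD i 0 → i < gt_label_list.length)
instance (vfy_im_tuples_list : List (Int × Int)) (Tu_list : List Int) (vfy_Tu_list : List Int) (gt_label_list : List (List Int)) : Decidable (Pre_remove_id vfy_im_tuples_list Tu_list vfy_Tu_list gt_label_list) := by unfold Pre_remove_id; infer_instance

def pvWitness_remove_id : (List (Int × Int)) × List Int × List Int × List (List Int) :=
  ([(1, 2), (3, 4), (5, 6)], [7, 8], [7, 9], [[1, 5], [3]])

def Spec_remove_id (vfy_im_tuples_list : List (Int × Int)) (Tu_list : List Int) (vfy_Tu_list : List Int) (gt_label_list : List (List Int)) (out : List (Int × Int)) : Prop := out = remove_id_alt vfy_im_tuples_list Tu_list vfy_Tu_list gt_label_list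
instance (vfy_im_tuples_list : List (Int × Int)) (Tu_list : List Int) (vfy_Tu_list : List Int) (gt_label_list : List (List Int)) (out : List (Int × Int)) : Decidable (Spec_remove_id vfy_im_tuples_list Tu_list vfy_Tu_list gt_label_list out) := by unfold Spec_remove_id; infer_instance

-- ===== CLAIM (what is proved, stated in full; the proofs are below) =====
def Claim_equal_remove_id : Prop := ∀ (vfy_im_tuples_list : List (Int × Int)) (Tu_list : List Int) (vfy_Tu_list : List Int) (gt_label_list : List (List Int)), Dom_remove_id vfy_im_tuples_list Tu_list vfy_Tu_list gt_label_list → Pre_remove_id vfy_im_tuples_list Tu_list vfy_Tu_list gt_label_list → Spec_remove_id vfy_im_tuples_list Tu_list vfy_Tu_list gt_label_list (remove_id vfy_im_tuples_list Tu_list vfy_Tu_list gt_label_list)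

-- ===== LEMMAS AND PROOFS =====

-- the label-collecting fold started from acc prepends acc
theorem labels_foldl_shift (c : Int → Prop) [DecidablePred c] (g : Int → List Int) :
    ∀ (rows : List Int) (acc : List Int),
      rows.foldl (fun acc i => if c i then acc ++ g i else acc) acc
        = acc ++ rows.foldl (fun acc i => if c i then acc ++ g i else acc) [] := by
  intro rows
  induction rows with
  | nil => intro acc; simp
  | cons r rows ih =>
      intro acc
      by_cases h : c r
      · simp only [List.foldl_cons, if_pos h, List.nil_append]
        rw [ih (acc ++ g r), ih (g r), List.append_assoc]
      · simp only [List.foldl_cons, if_neg h]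
        exact ih acc

-- a row loop folding each selected row's labels equals one fold over the concatenated labels
theorem foldl_rows_concat {σ : Type} (step : σ → Int → σ) (c : Int → Prop) [DecidablePred c]
    (g : Int → List Int) :
    ∀ (rows : List Int) (init : σ),
      rows.foldl (fun s i => if c i then (g i).foldl step s else s) init
        = (rows.foldl (fun acc i => if c i then acc ++ g i else acc) []).foldl step init := by
  intro rows
  induction rows with
  | nil => intro init; rfl
  | cons r rows ih =>
      intro init
      by_cases h : c r
      · simp only [List.foldl_cons, if_pos h, List.nil_append]
        rw [ih, labels_foldl_shift c g rows (g r), List.foldl_append]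
      · simp only [List.foldl_cons, if_neg h]
        exact ih init

-- erase of an absent key is the identity
theorem erase_of_not_contains (d : PySem.Dict Int Int) (k : Int)
    (h : d.contains k = false) : d.erase k = d := by
  apply PySem.Dict.ext
  simp only [PySem.Dict.erase]
  apply List.filter_eq_self.2
  intro p hp
  simp only [PySem.Dict.contains, List.any_eq_false] at h
  simp [h p hp]

-- folding erase over a label list filters out exactly those keys
theorem foldl_erase_eq_filter :
    ∀ (L : List Int) (d : PySem.Dict Int Int),
      (L.foldl (fun d l => d.erase l) d).items
        = d.items.filter (fun p => !(L.contains p.1)) := by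
  intro L
  induction L with
  | nil => intro d; simp
  | cons l L ih =>
      intro d
      rw [List.foldl_cons, ih (d.erase l)]
      simp only [PySem.Dict.erase, List.filter_filter]
      apply List.filter_congr
      intro p _
      by_cases h : p.1 = l
      · simp [h]
      · simp [h]

-- one insertion step commutes with filtering the items by a key predicate
theorem filter_insert_step (Q : Int → Bool) (d : PySem.Dict Int Int) (k : Int) (w : Int) :
    (d.insert k w).items.filter (fun p => Q p.1)
      = (if Q k then (PySem.Dict.mk (d.items.filter (fun p => Q p.1))).insert k w
         else PySem.Dict.mk (d.items.filter (fun p => Q p.1))).items := by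
  cases d with
  | mk items =>
      have key : ∀ p : Int × Int,
          Q ((if (p.1 == k) = true then ((k : Int), w) else p).1) = Q p.1 := by
        intro p
        by_cases h : p.1 = k <;> simp [h]
      by_cases hc : (PySem.Dict.mk (items := items) : PySem.Dict Int Int).contains k = true
      · have hmapfil :
            (items.map (fun p => if (p.1 == k) = true then (k, w) else p)).filter
                (fun p => Q p.1)
              = (items.filter (fun p => Q p.1)).map
                  (fun p => if (p.1 == k) = true then (k, w) else p) := by
          rw [List.filter_map]
          congr 1
          apply List.filter_congr
          intro p _
          exact key p
        by_cases hq : Q k = true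
        · have hc' : (PySem.Dict.mk (items.filter (fun p => Q p.1)) : PySem.Dict Int Int).contains k = true := by
            simp only [PySem.Dict.contains, List.any_eq_true] at hc ⊢
            obtain ⟨p, hp, hpk⟩ := hc
            have hp1 : p.1 = k := by simpa using hpk
            exact ⟨p, List.mem_filter.2 ⟨hp, by simp [hp1, hq]⟩, hpk⟩
          simp only [hq, if_pos, PySem.Dict.insert, hc, hc']
          exact hmapfil
        · have hq' : Q k = false := by simpa using hq
          simp only [hq', Bool.false_eq_true, if_neg, not_false_iff,
            PySem.Dict.insert, hc, if_pos]
          rw [hmapfil]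
          have hid : ∀ p ∈ items.filter (fun p => Q p.1),
              (if (p.1 == k) = true then ((k : Int), w) else p) = id p := by
            intro p hp
            have hpq : Q p.1 = true := by simpa using (List.mem_filter.1 hp).2
            have hne : p.1 ≠ k := fun hh => by
              rw [hh, hq'] at hpq; exact Bool.false_ne_true hpq
            simp [hne]
          rw [List.map_congr_left hid, List.map_id]
      · have hcf : (PySem.Dict.mk (items := items) : PySem.Dict Int Int).contains k = false :=
          Bool.eq_false_iff.mpr hc
        have hc' : (PySem.Dict.mk (items.filter (fun p => Q p.1)) : PySem.Dict Int Int).contains k = false := by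
          simp only [PySem.Dict.contains, List.any_eq_false] at hcf ⊢
          intro p hp
          exact hcf p (List.mem_filter.1 hp).1
        by_cases hq : Q k = true
        · simp [PySem.Dict.insert, hcf, hc', hq, List.filter_append]
        · have hq' : Q k = false := by simpa using hq
          simp [PySem.Dict.insert, hcf, hq', List.filter_append]

-- dict-building commutes with filtering by a key predicate
theorem foldl_insert_filter (Q : Int → Bool) :
    ∀ (v : List (Int × Int)) (d : PySem.Dict Int Int),
      (v.foldl (fun d p => d.insert p.1 p.2) d).items.filter (fun p => Q p.1)
        = (v.foldl (fun d p => if Q p.1 then d.insert p.1 p.2 else d)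
            (PySem.Dict.mk (d.items.filter (fun p => Q p.1)))).items := by
  intro v
  induction v with
  | nil => intro d; rfl
  | cons p v ih =>
      intro d
      have hinit : PySem.Dict.mk ((d.insert p.1 p.2).items.filter (fun q => Q q.1))
          = (if Q p.1 then (PySem.Dict.mk (d.items.filter (fun q => Q q.1))).insert p.1 p.2
             else PySem.Dict.mk (d.items.filter (fun q => Q q.1))) := by
        apply PySem.Dict.ext
        show (d.insert p.1 p.2).items.filter (fun q => Q q.1) = _
        exact filter_insert_step Q d p.1 p.2
      simp only [List.foldl_cons]
      rw [ih (d.insert p.1 p.2), hinit]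

-- pvBuildOut is the tail-recursive form of a foldl
theorem pvBuildOut_eq_foldl (matched : PySem.Set Int) :
    ∀ (v : List (Int × Int)) (d : PySem.Dict Int Int),
      pvBuildOut matched v d
        = v.foldl (fun d p => if matched.contains p.1 then d else d.insert p.1 p.2) d := by
  intro v
  induction v with
  | nil => intro d; rfl
  | cons p v ih => intro d; cases p; simp only [pvBuildOut, List.foldl_cons]; exact ih _

-- under Pre_, A's index-driven selected-label concatenation equals pvCollectLabels of the zip
theorem range_labels_eq_collect :
    ∀ (Tu vTu : List Int) (gt : List (List Int)),
      (∀ i : Nat, i < Tu.length →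
          i < vTu.length ∧ (Tu.getD i 0 = vTu.getD i 0 → i < gt.length)) →
      (List.range Tu.length).flatMap
          (fun k => if Tu.getD k 0 = vTu.getD k 0 then gt.getD k [] else [])
        = pvCollectLabels (Tu.zip (vTu.zip gt)) := by
  intro Tu
  induction Tu with
  | nil => intro vTu gt _; simp [pvCollectLabels]
  | cons t Tu ih =>
      intro vTu gt hpre
      obtain ⟨hv0, hg0⟩ := hpre 0 (Nat.succ_pos _)
      cases vTu with
      | nil => exact absurd hv0 (by simp)
      | cons vt vTu =>
          have hrange : List.range (t :: Tu).length
              = 0 :: (List.range Tu.length).map Nat.succ := by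
            simpa using List.range_succ_eq_map (n := Tu.length)
          rw [hrange]
          simp only [List.flatMap_cons, List.flatMap_map]
          cases gt with
          | nil =>
              have ht : ¬ (t :: Tu).getD 0 0 = (vt :: vTu).getD 0 0 := fun h => by
                simpa using hg0 h
              rw [if_neg ht]
              have hall : (List.range Tu.length).flatMap
                  (fun k => (fun j => if (t :: Tu).getD j 0 = (vt :: vTu).getD j 0 then
                      ([] : List (List Int)).getD j [] else []) (Nat.succ k)) = [] := by
                apply List.flatMap_eq_nil_iff.2
                intro k _
                simp only [List.getD]
                split <;> simp
              rw [hall]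
              simp [pvCollectLabels]
          | cons gl gt =>
              simp only [List.zip_cons_cons, pvCollectLabels]
              have hhead : (if (t :: Tu).getD 0 0 = (vt :: vTu).getD 0 0 then
                  (gl :: gt).getD 0 [] else []) = (if t = vt then gl else []) := by
                simp [List.getD]
              rw [hhead]
              congr 1
              have hshift : (fun k => (fun j => if (t :: Tu).getD j 0 = (vt :: vTu).getD j 0 then
                    (gl :: gt).getD j [] else []) (Nat.succ k))
                  = fun k => if Tu.getD k 0 = vTu.getD k 0 then gt.getD k [] else [] := by
                funext k; simp [List.getD]
              rw [hshift]
              apply ih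
              intro i hi
              have := hpre (i + 1) (by simpa using Nat.succ_lt_succ hi)
              constructor
              · exact Nat.lt_of_succ_lt_succ this.1
              · intro hmatch
                exact Nat.lt_of_succ_lt_succ (this.2 (by simpa [List.getD] using hmatch))

-- ===== VERDICT (by name: the statement is the Claim_ definition above) =====
theorem remove_id_spec : Claim_equal_remove_id := by
  intro v Tu vTu gt _ hpre
  show remove_id v Tu vTu gt = remove_id_alt v Tu vTu gt
  unfold remove_id remove_id_alt
  simp only []
  have herase : (fun (d : PySem.Dict Int Int) (l : Int) =>
        if d.contains l then d.erase l else d)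
      = fun (d : PySem.Dict Int Int) (l : Int) => d.erase l := by
    funext d l
    by_cases h : d.contains l = true
    · rw [if_pos h]
    · rw [if_neg (by simpa using h), erase_of_not_contains d l (by simpa using h)]
  set c : Int → Prop := fun i => PySem.List.pyGetD Tu i 0 = PySem.List.pyGetD vTu i 0 with hc
  set g : Int → List Int := fun i => PySem.List.pyGetD gt i [] with hg
  set rows := PySem.List.pyRange 0 (Tu.length : Int) 1 with hrows
  set L := rows.foldl (fun acc i => if c i then acc ++ g i else acc) [] with hL
  -- A side: collapse the nested loops into one erase-fold over L
  have hinner : ∀ (i : Int) (d : PySem.Dict Int Int),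
      (PySem.List.pyRange 0 ((g i).length : Int) 1).foldl
        (fun d j =>
          if d.contains (PySem.List.pyGetD (g i) j 0) then
            d.erase (PySem.List.pyGetD (g i) j 0) else d) d
        = (g i).foldl (fun d l => d.erase l) d := by
    intro i d
    rw [PySem.List.foldl_pyRange_zero_pyGetD' (g i) 0
      (fun (d : PySem.Dict Int Int) l => if d.contains l then d.erase l else d) d]
    rw [herase]
  have hA :
      rows.foldl
        (fun d i =>
          if c i then
            (PySem.List.pyRange 0 ((g i).length : Int) 1).foldl
              (fun d j =>
                if d.contains (PySem.List.pyGetD (g i) j 0) then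
                  d.erase (PySem.List.pyGetD (g i) j 0) else d) d
          else d)
        (PySem.Dict.ofList v)
        = L.foldl (fun d l => d.erase l) (PySem.Dict.ofList v) := by
    rw [show (fun (d : PySem.Dict Int Int) (i : Int) =>
          if c i then
            (PySem.List.pyRange 0 ((g i).length : Int) 1).foldl
              (fun d j =>
                if d.contains (PySem.List.pyGetD (g i) j 0) then
                  d.erase (PySem.List.pyGetD (g i) j 0) else d) d
          else d)
        = (fun (d : PySem.Dict Int Int) (i : Int) =>
            if c i then (g i).foldl (fun d l => d.erase l) d else d) from
      funext fun d => funext fun i => by rw [hinner i d]]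
    exact foldl_rows_concat (fun d l => d.erase l) c g rows (PySem.Dict.ofList v)
  -- the collected label list equals B's pvCollectLabels of the zip
  have hLflat : L = rows.flatMap (fun i => if c i then g i else []) := by
    rw [hL, show (fun (acc : List Int) (i : Int) => if c i then acc ++ g i else acc)
        = fun (acc : List Int) (i : Int) => acc ++ (if c i then g i else []) from
      funext fun acc => funext fun i => by split_ifs <;> simp]
    rw [PySem.List.foldl_append_eq_flatMap]
    rfl
  have hLcollect : L = pvCollectLabels (Tu.zip (vTu.zip gt)) := by
    rw [hLflat, hrows]
    rw [show ((Tu.length : Int)) = ((Tu.length : Nat) : Int) from rfl,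
      PySem.List.pyRange_zero_natCast, List.flatMap_map]
    rw [show (fun (k : Nat) => (fun i => if c i then g i else []) (k : Int))
        = fun (k : Nat) => if Tu.getD k 0 = vTu.getD k 0 then gt.getD k [] else [] from
      funext fun k => by simp [hc, hg, PySem.List.pyGetD_natCast]]
    exact range_labels_eq_collect Tu vTu gt hpre
  rw [hA, foldl_erase_eq_filter L (PySem.Dict.ofList v)]
  have hof : PySem.Dict.ofList v = v.foldl (fun d p => d.insert p.1 p.2) PySem.Dict.empty := rfl
  rw [hof, foldl_insert_filter (fun x => !(L.contains x)) v PySem.Dict.empty]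
  rw [pvBuildOut_eq_foldl]
  have hfun : (fun (d : PySem.Dict Int Int) (p : Int × Int) =>
        if (!L.contains p.1) = true then d.insert p.1 p.2 else d)
      = fun (d : PySem.Dict Int Int) (p : Int × Int) =>
          if (PySem.Set.ofList (pvCollectLabels (Tu.zip (vTu.zip gt)))).contains p.1 = true
          then d else d.insert p.1 p.2 := by
    funext d p
    have hmem : (PySem.Set.ofList (pvCollectLabels (Tu.zip (vTu.zip gt)))).contains p.1
        = L.contains p.1 := by
      rw [hLcollect]
      simp [PySem.Set.contains, PySem.Set.mem_ofList]
    rw [hmem]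
    cases h : L.contains p.1 <;> simp
  have hinit0 : PySem.Dict.mk
        ((PySem.Dict.empty : PySem.Dict Int Int).items.filter (fun p => !L.contains p.1))
      = (PySem.Dict.empty : PySem.Dict Int Int) := rfl
  rw [hinit0, hfun]
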